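-- pv_equiv track=rewrite | github.com/jordanhubbard/Theseus | cleanroom/python/theseus_datetime_cr/__init__.py | _ordinal_to_date
-- ===== SOURCE A (Python) =====
-- def _is_leap_year(year):
--     return (year % 4 == 0 and year % 100 != 0) or (year % 400 == 0)
--
-- def _days_in_month(year, month):
--     days = [0, 31, 28, 31, 30, 31, 30, 31, 31, 30, 31, 30, 31]
--     if month == 2 and _is_leap_year(year):
--         return 29
--     return days[month]
--
-- def _ordinal_to_date(ordinal):
--     """Convert an ordinal day count back to (year, month, day)."""
--     # Estimate the year
--     # Use 400-year cycles: 400 years = 146097 days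
--     n400, rem = divmod(ordinal - 1, 146097)
--     year = n400 * 400 + 1
--
--     # 100-year cycles: 100 years = 36524 days (but first cycle has 36525)
--     n100, rem = divmod(rem, 36524)
--     if n100 == 4:
--         n100 = 3
--         rem = 36524
--     year += n100 * 100
--
--     # 4-year cycles: 4 years = 1461 days
--     n4, rem = divmod(rem, 1461)
--     year += n4 * 4
--
--     # Remaining years
--     n1, rem = divmod(rem, 365)
--     if n1 == 4:
--         n1 = 3
--         rem = 365
--     year += n1
--
--     # Now find month and day
--     day_of_year = rem + 1
--     month = 1
--     while month <= 12:
--         dim = _days_in_month(year, month)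
--         if day_of_year <= dim:
--             break
--         day_of_year -= dim
--         month += 1
--
--     return year, month, day_of_year
-- ===== SOURCE B (Python) =====
-- def _is_leap_year(year):
--     return (year % 4 == 0 and year % 100 != 0) or (year % 400 == 0)
--
-- def _ordinal_to_date(ordinal):
--     """Convert an ordinal day count back to (year, month, day)."""
--     n400, rem = divmod(ordinal - 1, 146097)
--     # closed-form year-of-era (0..399) inside the 400-year cycle
--     yoe = (rem - rem // 1460 + rem // 36524 - rem // 146096) // 365
--     year = n400 * 400 + yoe + 1
--     # 1-based day of year from the days-before-this-year prefix count
--     doy = rem - (365 * yoe + yoe // 4 - yoe // 100) + 1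
--     feb = 29 if _is_leap_year(year) else 28
--     lengths = [31, feb, 31, 30, 31, 30, 31, 31, 30, 31, 30, 31]
--     cum = [0]
--     for d in lengths:
--         cum.append(cum[-1] + d)
--     month = sum(1 for c in cum[:12] if c < doy)
--     return year, month, doy - cum[month - 1]
-- ===== Notes on version B (the rewrite author's own statement) =====
-- stated objective: alternative
-- what changed: B replaces A's per-month repeated-subtraction while-loop by a cumulative month-boundary prefix table (month = count of prefix sums below the day-of-year, day = day-of-year minus the table entry) and replaces the 100/4/1-year divmod cascade by the closed-form year-of-era formula (rem - rem//1460 + rem//36524 - rem//146096)//365.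
import Mathlib
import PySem

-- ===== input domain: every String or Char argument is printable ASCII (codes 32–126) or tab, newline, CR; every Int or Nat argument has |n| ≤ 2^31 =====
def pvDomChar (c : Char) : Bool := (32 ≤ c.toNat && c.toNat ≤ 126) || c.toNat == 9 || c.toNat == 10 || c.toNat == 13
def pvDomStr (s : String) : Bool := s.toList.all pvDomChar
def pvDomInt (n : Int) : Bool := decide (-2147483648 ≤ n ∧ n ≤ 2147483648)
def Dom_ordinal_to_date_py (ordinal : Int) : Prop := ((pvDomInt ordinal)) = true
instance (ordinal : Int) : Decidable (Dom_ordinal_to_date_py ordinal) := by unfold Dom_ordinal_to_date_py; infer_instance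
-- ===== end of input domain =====

-- B replaces A's per-month repeated-subtraction scan by a cumulative month-boundary
-- table (month = number of prefix sums below the day-of-year) and replaces the
-- 100/4/1-year cascade by the closed-form year-of-era formula (alternative decomposition).

-- ===== PORT A =====
-- _is_leap_year: identical helper in both Python files (Source A and Source B), shared here.
def pyIsLeap (year : Int) : Bool :=
  (PySem.Int.mod year 4 == 0 && !(PySem.Int.mod year 100 == 0)) || (PySem.Int.mod year 400 == 0)

def pyDaysTable : List Int := [0, 31, 28, 31, 30, 31, 30, 31, 31, 30, 31, 30, 31]

-- _days_in_month; every call in A has month ∈ 1..12, so days[month] never raises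
def daysInMonthA (year month : Int) : Int :=
  if month == 2 && pyIsLeap year then 29
  else (PySem.List.pyGet? pyDaysTable month).getD 0

-- the 'while month <= 12' loop of A; fuel 13 covers all iterations (month 1..12, then exit)
def monthLoopA (year : Int) (dayOfYear month : Int) : Nat → Int × Int
  | 0 => (month, dayOfYear)
  | fuel+1 =>
    if month ≤ 12 then
      let dim := daysInMonthA year month
      if dayOfYear ≤ dim then (month, dayOfYear)
      else monthLoopA year (dayOfYear - dim) (month + 1) fuel
    else (month, dayOfYear)

def ordinal_to_date_py (ordinal : Int) : Int × Int × Int :=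
  let n400 := PySem.Int.floordiv (ordinal - 1) 146097
  let rem0 := PySem.Int.mod (ordinal - 1) 146097
  let year0 := n400 * 400 + 1
  let n100 := PySem.Int.floordiv rem0 36524
  let rem1 := PySem.Int.mod rem0 36524
  let rem1' := if n100 == 4 then (36524 : Int) else rem1
  let n100' := if n100 == 4 then (3 : Int) else n100
  let year1 := year0 + n100' * 100
  let n4 := PySem.Int.floordiv rem1' 1461
  let rem2 := PySem.Int.mod rem1' 1461
  let year2 := year1 + n4 * 4
  let n1 := PySem.Int.floordiv rem2 365
  let rem3 := PySem.Int.mod rem2 365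
  let rem3' := if n1 == 4 then (365 : Int) else rem3
  let n1' := if n1 == 4 then (3 : Int) else n1
  let year := year2 + n1'
  let dayOfYear := rem3' + 1
  let md := monthLoopA year dayOfYear 1 13
  (year, md.1, md.2)

-- ===== PORT B =====
def ordinal_to_date_py_alt (ordinal : Int) : Int × Int × Int :=
  let n400 := PySem.Int.floordiv (ordinal - 1) 146097
  let rem := PySem.Int.mod (ordinal - 1) 146097
  let yoe := PySem.Int.floordiv
    (rem - PySem.Int.floordiv rem 1460 + PySem.Int.floordiv rem 36524 - PySem.Int.floordiv rem 146096) 365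
  let year := n400 * 400 + yoe + 1
  let doy := rem - (365 * yoe + PySem.Int.floordiv yoe 4 - PySem.Int.floordiv yoe 100) + 1
  let feb : Int := if pyIsLeap year then 29 else 28
  let lengths : List Int := [31, feb, 31, 30, 31, 30, 31, 31, 30, 31, 30, 31]
  let cum : List Int := lengths.foldl (fun acc d => acc ++ [acc.getLast! + d]) [0]
  let month : Int := ((PySem.List.slice cum (some 0) (some 12)).filter (fun c => decide (c < doy))).length
  -- month ∈ 1..12, so cum[month-1] never raises
  (year, month, doy - (PySem.List.pyGet? cum (month - 1)).getD 0)

-- ===== PRECONDITION & SPEC =====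
def Spec_ordinal_to_date_py (ordinal : Int) (out : Int × Int × Int) : Prop := out = ordinal_to_date_py_alt ordinal
instance (ordinal : Int) (out : Int × Int × Int) : Decidable (Spec_ordinal_to_date_py ordinal out) := by unfold Spec_ordinal_to_date_py; infer_instance

-- ===== CLAIM (what is proved, stated in full; the proofs are below) =====
def Claim_equal_ordinal_to_date_py : Prop := ∀ (ordinal : Int), Dom_ordinal_to_date_py ordinal → Spec_ordinal_to_date_py ordinal (ordinal_to_date_py ordinal)

-- ===== LEMMAS AND PROOFS =====

-- the loop of A depends on year only through its leapness
theorem monthLoopA_congr (Y Y' : Int) (h : pyIsLeap Y = pyIsLeap Y') :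
    ∀ (f : Nat) (D m : Int), monthLoopA Y D m f = monthLoopA Y' D m f := by
  intro f
  induction f with
  | zero => intro D m; rfl
  | succ f ih =>
    intro D m
    simp only [monthLoopA, daysInMonthA, h, ih]

-- A's month/day computation as a function of leapness and day-of-year (Y = 4 is leap, Y = 1 is not)
def aMonthDay (leap : Bool) (doy : Int) : Int × Int :=
  monthLoopA (if leap then 4 else 1) doy 1 13

-- B's month/day computation as a function of leapness and day-of-year
def bMonthDay (leap : Bool) (doy : Int) : Int × Int :=
  let feb : Int := if leap then 29 else 28
  let lengths : List Int := [31, feb, 31, 30, 31, 30, 31, 31, 30, 31, 30, 31]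
  let cum : List Int := lengths.foldl (fun acc d => acc ++ [acc.getLast! + d]) [0]
  let month : Int := ((PySem.List.slice cum (some 0) (some 12)).filter (fun c => decide (c < doy))).length
  (month, doy - (PySem.List.pyGet? cum (month - 1)).getD 0)

theorem loop_to_aMonthDay (Y D : Int) : monthLoopA Y D 1 13 = aMonthDay (pyIsLeap Y) D := by
  cases h : pyIsLeap Y with
  | true => exact monthLoopA_congr Y 4 (by rw [h]; decide) 13 D 1
  | false => exact monthLoopA_congr Y 1 (by rw [h]; decide) 13 D 1

def mdTst (leap : Bool) (i : Nat) : Bool :=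
  aMonthDay leap ((i : Int) + 1) == bMonthDay leap ((i : Int) + 1)

set_option maxRecDepth 4000 in
theorem mdTst_all :
    (((List.range 366).all (mdTst true)) && ((List.range 365).all (mdTst false))) = true := by decide

theorem monthDayEq (leap : Bool) (doy : Int) (hlo : 1 ≤ doy)
    (hhi : doy ≤ if leap then 366 else 365) :
    aMonthDay leap doy = bMonthDay leap doy := by
  have h2 := mdTst_all
  rw [Bool.and_eq_true, List.all_eq_true, List.all_eq_true] at h2
  have hi : doy = ((doy - 1).toNat : Int) + 1 := by omega
  rw [hi]
  cases leap with
  | true =>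
    have hm : (doy - 1).toNat ∈ List.range 366 := by
      rw [List.mem_range]; simp at hhi; omega
    exact eq_of_beq (h2.1 _ hm)
  | false =>
    have hm : (doy - 1).toNat ∈ List.range 365 := by
      rw [List.mem_range]; simp at hhi; omega
    exact eq_of_beq (h2.2 _ hm)

-- pyIsLeap in plain arithmetic
theorem pyIsLeap_eq (y : Int) :
    pyIsLeap y = (decide ((y % 4 = 0 ∧ ¬ y % 100 = 0) ∨ y % 400 = 0)) := by
  have m4 : PySem.Int.mod y 4 = y % 4 := PySem.Int.mod_eq_emod_of_pos (by norm_num)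
  have m100 : PySem.Int.mod y 100 = y % 100 := PySem.Int.mod_eq_emod_of_pos (by norm_num)
  have m400 : PySem.Int.mod y 400 = y % 400 := PySem.Int.mod_eq_emod_of_pos (by norm_num)
  simp only [pyIsLeap, m4, m100, m400]
  by_cases h1 : y % 4 = 0 <;> by_cases h2 : y % 100 = 0 <;> by_cases h3 : y % 400 = 0 <;>
    simp [h1, h2, h3]

-- the 100/4/1 cascade year equals the closed-form year-of-era (Hinnant-style formula)
set_option maxHeartbeats 1600000 in
theorem hinnant_year (rem : Int) (h0 : 0 ≤ rem) (h1 : rem < 146097) :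
    (if rem / 36524 = 4 then (3:Int) else rem / 36524) * 100
      + (if rem / 36524 = 4 then (36524:Int) else rem % 36524) / 1461 * 4
      + (if (if rem / 36524 = 4 then (36524:Int) else rem % 36524) % 1461 / 365 = 4 then (3:Int)
         else (if rem / 36524 = 4 then (36524:Int) else rem % 36524) % 1461 / 365)
    = (rem - rem / 1460 + rem / 36524 - rem / 146096) / 365 := by
  have ha : rem / 36524 = 0 ∨ rem / 36524 = 1 ∨ rem / 36524 = 2 ∨ rem / 36524 = 3 ∨
      rem / 36524 = 4 := by omega
  have hb : rem % 36524 / 1461 ≤ 24 := by omega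
  rcases ha with h|h|h|h|h <;> rw [h] <;> norm_num <;> omega

-- the cascade's final remainder is the days before the resolved year-of-era, subtracted
theorem day_core (rem q1 r1 R1 Q1 q2 r2 q3 r3 R3 Q3 Y : Int)
    (h0 : 0 ≤ rem) (h1 : rem < 146097)
    (hq1 : q1 = rem / 36524) (hr1 : r1 = rem % 36524)
    (hR1 : R1 = if q1 = 4 then 36524 else r1)
    (hQ1 : Q1 = if q1 = 4 then 3 else q1)
    (hq2 : q2 = R1 / 1461) (hr2 : r2 = R1 % 1461)
    (hq3 : q3 = r2 / 365) (hr3 : r3 = r2 % 365)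
    (hR3 : R3 = if q3 = 4 then 365 else r3)
    (hQ3 : Q3 = if q3 = 4 then 3 else q3)
    (hY : Q1 * 100 + q2 * 4 + Q3 = Y) :
    R3 = rem - (365 * Y + Y / 4 - Y / 100) := by
  have b1 : 0 ≤ q1 ∧ q1 ≤ 4 := by omega
  have b2 : 0 ≤ r1 ∧ r1 < 36524 := by omega
  have b3 : 0 ≤ R1 ∧ R1 ≤ 36524 := by split_ifs at hR1 <;> omega
  have b4 : 0 ≤ q2 ∧ q2 ≤ 24 := by omega
  have b5 : 0 ≤ r2 ∧ r2 < 1461 := by omega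
  have b6 : 0 ≤ q3 ∧ q3 ≤ 4 := by omega
  have b7 : 0 ≤ Q1 ∧ Q1 ≤ 3 := by split_ifs at hQ1 <;> omega
  have b8 : 0 ≤ Q3 ∧ Q3 ≤ 3 := by split_ifs at hQ3 <;> omega
  have e9 : Y / 4 = Q1 * 25 + q2 := by omega
  have e10 : Y / 100 = Q1 := by omega
  rw [e9, e10]
  split_ifs at hR1 hQ1 hR3 hQ3 <;> omega

-- if the cascade produced day-of-year 366 (R3 = 365) the resolved year is leap
theorem leap_clamp (n400 rem q1 r1 R1 Q1 q2 r2 q3 r3 R3 Q3 : Int)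
    (h0 : 0 ≤ rem) (h1 : rem < 146097)
    (hq1 : q1 = rem / 36524) (hr1 : r1 = rem % 36524)
    (hR1 : R1 = if q1 = 4 then 36524 else r1)
    (hQ1 : Q1 = if q1 = 4 then 3 else q1)
    (hq2 : q2 = R1 / 1461) (hr2 : r2 = R1 % 1461)
    (hq3 : q3 = r2 / 365) (hr3 : r3 = r2 % 365)
    (hR3 : R3 = if q3 = 4 then 365 else r3)
    (hQ3 : Q3 = if q3 = 4 then 3 else q3)
    (hL : ¬ (((n400 * 400 + 1 + Q1 * 100 + q2 * 4 + Q3) % 4 = 0 ∧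
              ¬ (n400 * 400 + 1 + Q1 * 100 + q2 * 4 + Q3) % 100 = 0) ∨
             (n400 * 400 + 1 + Q1 * 100 + q2 * 4 + Q3) % 400 = 0)) :
    R3 + 1 ≤ 365 := by
  rw [not_or, not_and'] at hL
  obtain ⟨hL1, hL2⟩ := hL
  split_ifs at hR1 hQ1 hR3 hQ3 <;> omega

-- core arithmetic: the cascade and the closed form agree inside one 400-year cycle
set_option maxHeartbeats 1600000 in
theorem restEq (n400 rem : Int) (h0 : 0 ≤ rem) (h1 : rem < 146097) :
    (let year0 := n400 * 400 + 1
     let n100 := rem / 36524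
     let rem1 := rem % 36524
     let rem1' := if n100 == 4 then (36524 : Int) else rem1
     let n100' := if n100 == 4 then (3 : Int) else n100
     let year1 := year0 + n100' * 100
     let n4 := rem1' / 1461
     let rem2 := rem1' % 1461
     let year2 := year1 + n4 * 4
     let n1 := rem2 / 365
     let rem3 := rem2 % 365
     let rem3' := if n1 == 4 then (365 : Int) else rem3
     let n1' := if n1 == 4 then (3 : Int) else n1
     let year := year2 + n1'
     let dayOfYear := rem3' + 1
     let md := monthLoopA year dayOfYear 1 13
     ((year, md.1, md.2) : Int × Int × Int))
    = (let yoe := (rem - rem / 1460 + rem / 36524 - rem / 146096) / 365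
       let year := n400 * 400 + yoe + 1
       let doy := rem - (365 * yoe + yoe / 4 - yoe / 100) + 1
       let feb : Int := if pyIsLeap year then 29 else 28
       let lengths : List Int := [31, feb, 31, 30, 31, 30, 31, 31, 30, 31, 30, 31]
       let cum : List Int := lengths.foldl (fun acc d => acc ++ [acc.getLast! + d]) [0]
       let month : Int := ((PySem.List.slice cum (some 0) (some 12)).filter (fun c => decide (c < doy))).length
       (year, month, doy - (PySem.List.pyGet? cum (month - 1)).getD 0)) := by
  dsimp only
  simp only [beq_iff_eq]
  set q1 : Int := rem / 36524 with hq1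
  set r1 : Int := rem % 36524 with hr1
  set R1 : Int := if q1 = 4 then (36524:Int) else r1 with hR1
  set Q1 : Int := if q1 = 4 then (3:Int) else q1 with hQ1
  set q2 : Int := R1 / 1461 with hq2
  set r2 : Int := R1 % 1461 with hr2
  set q3 : Int := r2 / 365 with hq3
  set r3 : Int := r2 % 365 with hr3
  set R3 : Int := if q3 = 4 then (365:Int) else r3 with hR3
  set Q3 : Int := if q3 = 4 then (3:Int) else q3 with hQ3
  set d1 : Int := rem / 1460 with hd1
  set d2 : Int := rem / 146096 with hd2
  set Y : Int := (rem - d1 + q1 - d2) / 365 with hY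
  clear_value q1 r1 R1 Q1 q2 r2 q3 r3 R3 Q3 d1 d2 Y
  have e1 : Q1 * 100 + q2 * 4 + Q3 = Y := by
    subst hY hd1 hd2 hQ3 hR3 hq3 hr3 hq2 hr2 hQ1 hR1 hq1 hr1
    exact hinnant_year rem h0 h1
  have e2 : R3 = rem - (365 * Y + Y / 4 - Y / 100) :=
    day_core rem q1 r1 R1 Q1 q2 r2 q3 r3 R3 Q3 Y h0 h1
      hq1 hr1 hR1 hQ1 hq2 hr2 hq3 hr3 hR3 hQ3 e1
  have e3 : 0 ≤ R3 ∧ R3 ≤ 365 := by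
    split_ifs at hR3 with c3 <;> omega
  have hyy : n400 * 400 + 1 + Q1 * 100 + q2 * 4 + Q3 = n400 * 400 + Y + 1 := by
    rw [← e1]; ring
  have e5 : rem - (365 * Y + Y / 4 - Y / 100) + 1 = R3 + 1 := by rw [← e2]
  rw [← hyy]
  simp only [e5]
  have hmd : monthLoopA (n400 * 400 + 1 + Q1 * 100 + q2 * 4 + Q3) (R3 + 1) 1 13
      = bMonthDay (pyIsLeap (n400 * 400 + 1 + Q1 * 100 + q2 * 4 + Q3)) (R3 + 1) := by
    rw [loop_to_aMonthDay]
    refine monthDayEq _ _ (by omega) ?_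
    cases hL : pyIsLeap (n400 * 400 + 1 + Q1 * 100 + q2 * 4 + Q3) with
    | true => simp only [if_true]; omega
    | false =>
      rw [pyIsLeap_eq] at hL
      simp only [decide_eq_false_iff_not] at hL
      simp only [Bool.false_eq_true, if_false]
      exact leap_clamp n400 rem q1 r1 R1 Q1 q2 r2 q3 r3 R3 Q3 h0 h1
        hq1 hr1 hR1 hQ1 hq2 hr2 hq3 hr3 hR3 hQ3 hL
  simp only [bMonthDay] at hmd
  rw [hmd]

-- ===== VERDICT (by name: the statement is the Claim_ definition above) =====
theorem ordinal_to_date_py_spec : Claim_equal_ordinal_to_date_py := by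
  intro ordinal _
  unfold Spec_ordinal_to_date_py ordinal_to_date_py ordinal_to_date_py_alt
  have f146097 : ∀ a : Int, PySem.Int.floordiv a 146097 = a / 146097 :=
    fun a => PySem.Int.floordiv_eq_ediv_of_pos (by norm_num)
  have m146097 : ∀ a : Int, PySem.Int.mod a 146097 = a % 146097 :=
    fun a => PySem.Int.mod_eq_emod_of_pos (by norm_num)
  have f36524 : ∀ a : Int, PySem.Int.floordiv a 36524 = a / 36524 :=
    fun a => PySem.Int.floordiv_eq_ediv_of_pos (by norm_num)
  have m36524 : ∀ a : Int, PySem.Int.mod a 36524 = a % 36524 :=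
    fun a => PySem.Int.mod_eq_emod_of_pos (by norm_num)
  have f1461 : ∀ a : Int, PySem.Int.floordiv a 1461 = a / 1461 :=
    fun a => PySem.Int.floordiv_eq_ediv_of_pos (by norm_num)
  have m1461 : ∀ a : Int, PySem.Int.mod a 1461 = a % 1461 :=
    fun a => PySem.Int.mod_eq_emod_of_pos (by norm_num)
  have f365 : ∀ a : Int, PySem.Int.floordiv a 365 = a / 365 :=
    fun a => PySem.Int.floordiv_eq_ediv_of_pos (by norm_num)
  have m365 : ∀ a : Int, PySem.Int.mod a 365 = a % 365 :=
    fun a => PySem.Int.mod_eq_emod_of_pos (by norm_num)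
  have f1460 : ∀ a : Int, PySem.Int.floordiv a 1460 = a / 1460 :=
    fun a => PySem.Int.floordiv_eq_ediv_of_pos (by norm_num)
  have f146096 : ∀ a : Int, PySem.Int.floordiv a 146096 = a / 146096 :=
    fun a => PySem.Int.floordiv_eq_ediv_of_pos (by norm_num)
  have f4 : ∀ a : Int, PySem.Int.floordiv a 4 = a / 4 :=
    fun a => PySem.Int.floordiv_eq_ediv_of_pos (by norm_num)
  have f100 : ∀ a : Int, PySem.Int.floordiv a 100 = a / 100 :=
    fun a => PySem.Int.floordiv_eq_ediv_of_pos (by norm_num)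
  simp only [f146097, m146097, f36524, m36524, f1461, m1461, f365, m365, f1460, f146096, f4, f100]
  exact restEq ((ordinal - 1) / 146097) ((ordinal - 1) % 146097)
    (Int.emod_nonneg _ (by norm_num)) (Int.emod_lt_of_pos _ (by norm_num))
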